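-- pv_equiv track=rewrite | github.com/maenwi/Coding-Test-Problem-Solve | 프로그래머스/2/250136. ［PCCP 기출문제］ 2번 ／ 석유 시추/［PCCP 기출문제］ 2번 ／ 석유 시추.py | solution
-- ===== SOURCE A (Python) =====
-- from collections import deque
-- from collections import defaultdict
--
-- def solution(land):
--     R = len(land)
--     C = len(land[0])
--     visited = [[False] * C for _ in range(R)]
--     d = [(-1, 0), (+1, 0), (0, -1), (0, +1)]
--
--     clusters = {}
--
--     for r in range(R):
--         for c in range(C):
--             if land[r][c] == 1 and not visited[r][c]:
--                 # Cluster 찾기 시작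
--                 q = deque([(r, c)])
--                 visited[r][c] = True
--                 a_cluster = [(r, c)]
--
--                 while q:
--                     cr, cc = q.popleft()
--
--                     for dr, dc in d:
--                         nr, nc = cr + dr, cc + dc
--
--                         if (0 <= nr < R and
--                             0 <= nc < C and
--                             land[nr][nc] == 1 and
--                             not visited[nr][nc]):
--                             q.append((nr, nc))
--                             visited[nr][nc] = True
--                             a_cluster.append((nr, nc))
--
--                 # cluster의 각 column 별로 row 값이 제일 작은거 뽑기
--                 a_cluster_ceil = defaultdict(lambda:R)
--                 for cluster_r, cluster_c in a_cluster:
--                     # 현재 가장 높은 위치와 이번의 위치를 비교해서 작은 값만 남기기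
--                     a_cluster_ceil[cluster_c] = min(cluster_r, a_cluster_ceil[cluster_c])
--
--                 for cluster_c, cluster_r in a_cluster_ceil.items():
--                     clusters[(cluster_r, cluster_c)] = len(a_cluster)
--
--     # 여기서부터 이제 시추관 서치
--     max_oils = -1
--     for c in range(C):
--         oils = 0
--         for r in range(R):
--             oils += clusters.get((r, c), 0)
--         max_oils = max(oils, max_oils)
--
--     return max_oils
-- ===== SOURCE B (Python) =====
-- def solution(land):
--     R, C = len(land), len(land[0])
--     best = -1
--     for c in range(C):
--         # multi-source flood fill from every oil cell of this column:
--         # the reachable set is exactly the union of the clusters the drill hits,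
--         # so its size is the oil collected at this column.
--         seeds = [(r, c) for r in range(R) if land[r][c] == 1]
--         seen = set(seeds)
--         stack = list(seeds)
--         while stack:
--             cr, cc = stack.pop()
--             for nr, nc in ((cr - 1, cc), (cr + 1, cc), (cr, cc - 1), (cr, cc + 1)):
--                 if 0 <= nr < R and 0 <= nc < C and land[nr][nc] == 1 and (nr, nc) not in seen:
--                     seen.add((nr, nc))
--                     stack.append((nr, nc))
--         best = max(best, len(seen))
--     return best
-- ===== Notes on version B (the rewrite author's own statement) =====
-- stated objective: alternative
-- what changed: Instead of labelling clusters once (BFS per cluster with a deque, a ceiling-cell dict of sizes, then R dict lookups per column), B runs one multi-source flood fill per column starting from all oil cells of that column and takes the size of the reachable set, which equals the sum of the sizes of the clusters the drill hits; no cluster dict, sizes or deque exist at all.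
import Mathlib
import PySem

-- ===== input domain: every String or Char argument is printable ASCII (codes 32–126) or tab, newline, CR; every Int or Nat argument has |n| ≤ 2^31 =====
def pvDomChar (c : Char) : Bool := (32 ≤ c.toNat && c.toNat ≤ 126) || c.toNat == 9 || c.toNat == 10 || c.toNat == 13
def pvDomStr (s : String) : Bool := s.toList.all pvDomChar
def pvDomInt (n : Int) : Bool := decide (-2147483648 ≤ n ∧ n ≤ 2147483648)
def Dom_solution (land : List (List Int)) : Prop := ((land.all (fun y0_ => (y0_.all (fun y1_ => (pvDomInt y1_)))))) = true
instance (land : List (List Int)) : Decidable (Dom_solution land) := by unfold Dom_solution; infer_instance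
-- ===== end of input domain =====

-- B replaces A's one global BFS cluster labelling (ceiling-cell dict of cluster sizes, then
-- dict lookups per column) by one multi-source flood fill per column: the size of the set
-- reachable from the column's oil cells is the oil collected there (alternative algorithm).
-- The mutable boolean grid of A is modelled as a function Int → Int → Bool.

-- land[r][c] (both Pythons index only after a bounds check, so the defaults never fire inside Pre_)
def pvCell (land : List (List Int)) (r c : Int) : Int :=
  (PySem.List.pyGet? ((PySem.List.pyGet? land r).getD []) c).getD 0

-- ===== PORT A =====
def pvDirs : List (Int × Int) := [(-1, 0), (1, 0), (0, -1), (0, 1)]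

-- one neighbour attempt of A's BFS; state = (queue, visited, a_cluster)
def pvTryA (land : List (List Int)) (R C cr cc : Int)
    (s : List (Int × Int) × (Int → Int → Bool) × List (Int × Int)) (d : Int × Int) :
    List (Int × Int) × (Int → Int → Bool) × List (Int × Int) :=
  let nr := cr + d.1
  let nc := cc + d.2
  if 0 ≤ nr ∧ nr < R ∧ 0 ≤ nc ∧ nc < C ∧ pvCell land nr nc = 1 ∧ s.2.1 nr nc = false then
    (s.1 ++ [(nr, nc)], (fun r' c' => if r' = nr ∧ c' = nc then true else s.2.1 r' c'),
      s.2.2 ++ [(nr, nc)])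
  else s

-- A's 'while q' loop (deque: pop at the front, append at the back); fuel only makes it total
def pvBfsA (land : List (List Int)) (R C : Int) :
    Nat → List (Int × Int) → (Int → Int → Bool) → List (Int × Int) →
      ((Int → Int → Bool) × List (Int × Int))
  | 0, _, v, acc => (v, acc)
  | _ + 1, [], v, acc => (v, acc)
  | fuel + 1, (cr, cc) :: rest, v, acc =>
    let s := pvDirs.foldl (pvTryA land R C cr cc) (rest, v, acc)
    pvBfsA land R C fuel s.1 s.2.1 s.2.2

-- a_cluster_ceil: defaultdict(lambda: R) keyed by column, keeping the smallest row
def pvCeil (R : Int) (acc : List (Int × Int)) : PySem.Dict Int Int :=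
  acc.foldl (fun d p => d.insert p.2 (min p.1 (d.getD p.2 R))) PySem.Dict.empty

def solution (land : List (List Int)) : Int :=
  let R : Int := (land.length : Int)
  let C : Int := (land.headI.length : Int)
  let st :=
    (PySem.List.pyRange 0 R 1).foldl (fun st r =>
      (PySem.List.pyRange 0 C 1).foldl (fun st c =>
        if pvCell land r c = 1 ∧ st.1 r c = false then
          let v1 : Int → Int → Bool := fun r' c' => if r' = r ∧ c' = c then true else st.1 r' c'
          let res := pvBfsA land R C (5 * R.toNat * C.toNat + 1) [(r, c)] v1 [(r, c)]
          (res.1,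
            (pvCeil R res.2).items.foldl
              (fun cl p => cl.insert (p.2, p.1) ((res.2.length : Nat) : Int)) st.2)
        else st) st)
      ((fun _ _ => false), (PySem.Dict.empty : PySem.Dict (Int × Int) Int))
  (PySem.List.pyRange 0 C 1).foldl (fun m c =>
    max ((PySem.List.pyRange 0 R 1).foldl (fun oils r => oils + st.2.getD (r, c) 0) 0) m) (-1)

-- ===== PORT B =====
-- the four neighbour coordinates B's inner tuple loop runs over
def pvNbrs (cr cc : Int) : List (Int × Int) :=
  [(cr - 1, cc), (cr + 1, cc), (cr, cc - 1), (cr, cc + 1)]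

-- one neighbour attempt of B's flood fill; state = (stack, seen)
def pvStepB (land : List (List Int)) (R C : Int)
    (s : List (Int × Int) × PySem.Set (Int × Int)) (n : Int × Int) :
    List (Int × Int) × PySem.Set (Int × Int) :=
  if 0 ≤ n.1 ∧ n.1 < R ∧ 0 ≤ n.2 ∧ n.2 < C ∧ pvCell land n.1 n.2 = 1 ∧ ¬ n ∈ s.2 then
    (n :: s.1, PySem.Set.add s.2 n)
  else s

-- B's 'while stack' loop (push/pop at the same end, modelled at the list head — the
-- resulting SET, the only thing used, does not depend on the pop order); fuel only makes it total
def pvFloodB (land : List (List Int)) (R C : Int) :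
    Nat → List (Int × Int) → PySem.Set (Int × Int) → PySem.Set (Int × Int)
  | 0, _, seen => seen
  | _ + 1, [], seen => seen
  | fuel + 1, (cr, cc) :: rest, seen =>
    let s := (pvNbrs cr cc).foldl (pvStepB land R C) (rest, seen)
    pvFloodB land R C fuel s.1 s.2

-- [(r, c) for r in range(R) if land[r][c] == 1]
def pvSeeds (land : List (List Int)) (R c : Int) : List (Int × Int) :=
  ((PySem.List.pyRange 0 R 1).filter (fun r => pvCell land r c == 1)).map (fun r => (r, c))

def solution_alt (land : List (List Int)) : Int :=
  let R : Int := (land.length : Int)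
  let C : Int := (land.headI.length : Int)
  (PySem.List.pyRange 0 C 1).foldl (fun best c =>
    let seeds := pvSeeds land R c
    let seen := pvFloodB land R C (5 * R.toNat * C.toNat + R.toNat + 1) seeds
      (PySem.Set.ofList seeds)
    max best ((seen.length : Int))) (-1)

-- ===== PRECONDITION & SPEC =====
-- Pre_ excludes exactly the inputs where A raises: the empty list (land[0] IndexError) and
-- ragged inputs with some row shorter than row 0 (land[r][c] IndexError during the scan).
def Pre_solution (land : List (List Int)) : Prop :=
  land ≠ [] ∧ ∀ row ∈ land, land.headI.length ≤ row.length
instance (land : List (List Int)) : Decidable (Pre_solution land) := by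
  unfold Pre_solution; infer_instance

def pvWitness_solution : List (List Int) := [[1, 0], [1, 1]]

def Spec_solution (land : List (List Int)) (out : Int) : Prop := out = solution_alt land
instance (land : List (List Int)) (out : Int) : Decidable (Spec_solution land out) := by
  unfold Spec_solution; infer_instance

-- ===== CLAIM (what is proved, stated in full; the proofs are below) =====
def Claim_equal_solution : Prop :=
  ∀ (land : List (List Int)), Dom_solution land → Pre_solution land →
    Spec_solution land (solution land)

-- ===== LEMMAS AND PROOFS =====

-- ---------- abstract grid notions (proof-only) ----------

def pvOk (land : List (List Int)) (R C : Int) (p : Int × Int) : Prop :=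
  0 ≤ p.1 ∧ p.1 < R ∧ 0 ≤ p.2 ∧ p.2 < C ∧ pvCell land p.1 p.2 = 1

def pvAdj (p q : Int × Int) : Prop := ∃ d ∈ pvDirs, q = (p.1 + d.1, p.2 + d.2)

def pvReach (land : List (List Int)) (R C : Int) (s p : Int × Int) : Prop :=
  Relation.ReflTransGen (fun p q => pvAdj p q ∧ pvOk land R C q) s p

noncomputable def pvU (R C : Int) (m : Int × Int → Bool) : Nat :=
  (((Finset.Ico 0 R) ×ˢ (Finset.Ico 0 C)).filter (fun p => m p = false)).card

lemma pvU_mark (R C : Int) (m m' : Int × Int → Bool) (p : Int × Int)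
    (hp1 : 0 ≤ p.1) (hp2 : p.1 < R) (hp3 : 0 ≤ p.2) (hp4 : p.2 < C)
    (hm : m p = false) (hm' : ∀ x, m' x = if x = p then true else m x) :
    pvU R C m = pvU R C m' + 1 := by
  unfold pvU
  have hmem : p ∈ ((Finset.Ico 0 R) ×ˢ (Finset.Ico 0 C)).filter (fun x => m x = false) := by
    simp [Finset.mem_filter, Finset.mem_product, Finset.mem_Ico, hp1, hp2, hp3, hp4, hm]
  have hset : ((Finset.Ico 0 R) ×ˢ (Finset.Ico 0 C)).filter (fun x => m' x = false)
      = (((Finset.Ico 0 R) ×ˢ (Finset.Ico 0 C)).filter (fun x => m x = false)).erase p := by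
    ext x
    by_cases hx : x = p
    · subst hx
      simp [Finset.mem_erase, hm' x]
    · simp [Finset.mem_erase, Finset.mem_filter, hm' x, hx]
  rw [hset, Finset.card_erase_of_mem hmem]
  have : 0 < (((Finset.Ico 0 R) ×ˢ (Finset.Ico 0 C)).filter (fun x => m x = false)).card :=
    Finset.card_pos.mpr ⟨p, hmem⟩
  omega

lemma pvU_le (R C : Int) (m : Int × Int → Bool) : pvU R C m ≤ R.toNat * C.toNat := by
  unfold pvU
  calc _ ≤ ((Finset.Ico (0:ℤ) R) ×ˢ (Finset.Ico (0:ℤ) C)).card := Finset.card_filter_le _ _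
    _ = R.toNat * C.toNat := by
      rw [Finset.card_product, Int.card_Ico, Int.card_Ico]
      simp

lemma pvReach_ok (land : List (List Int)) (R C : Int) (s p : Int × Int)
    (h : pvReach land R C s p) (hs : pvOk land R C s) : pvOk land R C p := by
  induction h with
  | refl => exact hs
  | tail _ hstep ih => exact hstep.2

lemma pvAdj_symm (p q : Int × Int) (h : pvAdj p q) : pvAdj q p := by
  obtain ⟨d, hd, rfl⟩ := h
  simp only [pvDirs, List.mem_cons, List.not_mem_nil, or_false] at hd
  rcases hd with h | h | h | h <;> subst h
  · exact ⟨(1, 0), by norm_num [pvDirs], Prod.ext_iff.mpr ⟨by ring, by ring⟩⟩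
  · exact ⟨(-1, 0), by norm_num [pvDirs], Prod.ext_iff.mpr ⟨by ring, by ring⟩⟩
  · exact ⟨(0, 1), by norm_num [pvDirs], Prod.ext_iff.mpr ⟨by ring, by ring⟩⟩
  · exact ⟨(0, -1), by norm_num [pvDirs], Prod.ext_iff.mpr ⟨by ring, by ring⟩⟩

lemma pvReach_symm (land : List (List Int)) (R C : Int) (s p : Int × Int)
    (hs : pvOk land R C s) (h : pvReach land R C s p) : pvReach land R C p s := by
  induction h with
  | refl => exact Relation.ReflTransGen.refl
  | tail hr hstep ih =>
    exact Relation.ReflTransGen.trans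
      (Relation.ReflTransGen.single
        ⟨pvAdj_symm _ _ hstep.1, pvReach_ok land R C s _ hr hs⟩) ih

-- marking is propagated along reachability by closedness
lemma vclosed_reach (land : List (List Int)) (R C : Int) (v : Int → Int → Bool)
    (hcl : ∀ p : Int × Int, v p.1 p.2 = true →
      ∀ q, pvAdj p q → pvOk land R C q → v q.1 q.2 = true)
    (p q : Int × Int) (hp : v p.1 p.2 = true) (h : pvReach land R C p q) :
    v q.1 q.2 = true := by
  induction h with
  | refl => exact hp
  | tail _ hstep ih => exact hcl _ ih _ hstep.1 hstep.2

-- ---------- A's BFS invariant ----------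

structure InvA (land : List (List Int)) (R C : Int) (seed : Int × Int) (v₀ : Int → Int → Bool)
    (q : List (Int × Int)) (v : Int → Int → Bool) (acc : List (Int × Int)) : Prop where
  mono : ∀ r c, v₀ r c = true → v r c = true
  seedm : v seed.1 seed.2 = true
  qmark : ∀ p ∈ q, v p.1 p.2 = true
  qnew : ∀ p ∈ q, v₀ p.1 p.2 = false
  src : ∀ r c, v r c = true → v₀ r c = true ∨ pvReach land R C seed (r, c)
  okm : ∀ r c, v r c = true → pvOk land R C (r, c)
  closed : ∀ p : Int × Int, v p.1 p.2 = true → p ∉ q →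
      ∀ q', pvAdj p q' → pvOk land R C q' → v q'.1 q'.2 = true
  accm : ∀ p : Int × Int, p ∈ acc ↔ (v p.1 p.2 = true ∧ v₀ p.1 p.2 = false)
  accnd : acc.Nodup

-- invariant during processing of the four directions of a popped cell (cr, cc)
structure PartA (land : List (List Int)) (R C : Int) (seed : Int × Int) (v₀ : Int → Int → Bool)
    (cr cc : Int) (done : List (Int × Int))
    (q : List (Int × Int)) (v : Int → Int → Bool) (acc : List (Int × Int)) : Prop where
  mono : ∀ r c, v₀ r c = true → v r c = true
  seedm : v seed.1 seed.2 = true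
  qmark : ∀ p ∈ q, v p.1 p.2 = true
  qnew : ∀ p ∈ q, v₀ p.1 p.2 = false
  src : ∀ r c, v r c = true → v₀ r c = true ∨ pvReach land R C seed (r, c)
  okm : ∀ r c, v r c = true → pvOk land R C (r, c)
  popm : v cr cc = true
  popreach : pvReach land R C seed (cr, cc)
  closedx : ∀ p : Int × Int, v p.1 p.2 = true → p ∉ q → p ≠ (cr, cc) →
      ∀ q', pvAdj p q' → pvOk land R C q' → v q'.1 q'.2 = true
  pdone : ∀ d ∈ done, pvOk land R C (cr + d.1, cc + d.2) → v (cr + d.1) (cc + d.2) = true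
  accm : ∀ p : Int × Int, p ∈ acc ↔ (v p.1 p.2 = true ∧ v₀ p.1 p.2 = false)
  accnd : acc.Nodup

lemma tryA_part (land : List (List Int)) (R C : Int) (seed : Int × Int) (v₀ : Int → Int → Bool)
    (cr cc : Int) (done : List (Int × Int)) (d : Int × Int) (hd : d ∈ pvDirs)
    (q : List (Int × Int)) (v : Int → Int → Bool) (acc : List (Int × Int))
    (h : PartA land R C seed v₀ cr cc done q v acc) :
    PartA land R C seed v₀ cr cc (done ++ [d])
        (pvTryA land R C cr cc (q, v, acc) d).1
        (pvTryA land R C cr cc (q, v, acc) d).2.1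
        (pvTryA land R C cr cc (q, v, acc) d).2.2 ∧
      5 * pvU R C (fun p => (pvTryA land R C cr cc (q, v, acc) d).2.1 p.1 p.2)
          + (pvTryA land R C cr cc (q, v, acc) d).1.length
        ≤ 5 * pvU R C (fun p => v p.1 p.2) + q.length := by
  by_cases hc : 0 ≤ cr + d.1 ∧ cr + d.1 < R ∧ 0 ≤ cc + d.2 ∧ cc + d.2 < C ∧
      pvCell land (cr + d.1) (cc + d.2) = 1 ∧ v (cr + d.1) (cc + d.2) = false
  case neg =>
    have he : pvTryA land R C cr cc (q, v, acc) d = (q, v, acc) := by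
      simp only [pvTryA]
      rw [if_neg hc]
    rw [he]
    refine ⟨⟨h.mono, h.seedm, h.qmark, h.qnew, h.src, h.okm, h.popm, h.popreach, h.closedx,
      ?_, h.accm, h.accnd⟩, le_refl _⟩
    intro d' hd' hok
    rcases List.mem_append.mp hd' with hin | hin
    · exact h.pdone d' hin hok
    · have hde : d' = d := by simpa using hin
      subst hde
      have h1 : 0 ≤ cr + d'.1 := hok.1
      have h2 : cr + d'.1 < R := hok.2.1
      have h3 : 0 ≤ cc + d'.2 := hok.2.2.1
      have h4 : cc + d'.2 < C := hok.2.2.2.1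
      have h5 : pvCell land (cr + d'.1) (cc + d'.2) = 1 := hok.2.2.2.2
      by_cases hv : v (cr + d'.1) (cc + d'.2) = false
      · exact absurd ⟨h1, h2, h3, h4, h5, hv⟩ hc
      · simpa using hv
  case pos =>
    obtain ⟨h1, h2, h3, h4, h5, h6⟩ := hc
    have he : pvTryA land R C cr cc (q, v, acc) d =
        (q ++ [(cr + d.1, cc + d.2)],
         (fun r' c' => if r' = cr + d.1 ∧ c' = cc + d.2 then true else v r' c'),
         acc ++ [(cr + d.1, cc + d.2)]) := by
      simp only [pvTryA]
      rw [if_pos ⟨h1, h2, h3, h4, h5, h6⟩]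
    rw [he]
    dsimp only
    set nr := cr + d.1 with hnr
    set nc := cc + d.2 with hnc
    set v' : Int → Int → Bool := fun r' c' => if r' = nr ∧ c' = nc then true else v r' c' with hv'
    have hvmark : ∀ r c, v r c = true → v' r c = true := by
      intro r c hrc
      by_cases hh : r = nr ∧ c = nc <;> simp [hv', hh, hrc]
    have hvnew : v' nr nc = true := by simp [hv']
    have hvold : ∀ r c, ¬(r = nr ∧ c = nc) → v' r c = v r c := by
      intro r c hh
      simp [hv', hh]
    have hnok : pvOk land R C (nr, nc) := ⟨h1, h2, h3, h4, h5⟩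
    have hreach : pvReach land R C seed (nr, nc) :=
      Relation.ReflTransGen.tail h.popreach ⟨⟨d, hd, rfl⟩, hnok⟩
    have h0new : v₀ nr nc = false := by
      by_cases hz : v₀ nr nc = true
      · exact absurd (h.mono _ _ hz) (by simp [h6])
      · simpa using hz
    have hUeq : pvU R C (fun p => v p.1 p.2) = pvU R C (fun p => v' p.1 p.2) + 1 := by
      refine pvU_mark R C _ _ (nr, nc) h1 h2 h3 h4 h6 ?_
      intro x
      by_cases hx : x.1 = nr ∧ x.2 = nc
      · simp [hv', hx, Prod.ext_iff]
      · simp [hv', hx, Prod.ext_iff]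
    constructor
    · refine ⟨?_, ?_, ?_, ?_, ?_, ?_, ?_, h.popreach, ?_, ?_, ?_, ?_⟩
      · intro r c hz
        exact hvmark r c (h.mono r c hz)
      · exact hvmark _ _ h.seedm
      · intro p hp
        rcases List.mem_append.mp hp with hin | hin
        · exact hvmark _ _ (h.qmark p hin)
        · have : p = (nr, nc) := by simpa using hin
          subst this
          exact hvnew
      · intro p hp
        rcases List.mem_append.mp hp with hin | hin
        · exact h.qnew p hin
        · have : p = (nr, nc) := by simpa using hin
          subst this
          exact h0new
      · intro r c hz
        by_cases hh : r = nr ∧ c = nc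
        · right
          rw [hh.1, hh.2]
          exact hreach
        · rw [hvold r c hh] at hz
          exact h.src r c hz
      · intro r c hz
        by_cases hh : r = nr ∧ c = nc
        · rw [hh.1, hh.2]
          exact hnok
        · rw [hvold r c hh] at hz
          exact h.okm r c hz
      · exact hvmark _ _ h.popm
      · intro p hp hpq hpne q' hadj hok
        by_cases hh : p = (nr, nc)
        · exact absurd (List.mem_append.mpr (Or.inr (by simp [hh]))) hpq
        · have hne : ¬(p.1 = nr ∧ p.2 = nc) := by
            intro hcong
            exact hh (Prod.ext hcong.1 hcong.2)
          rw [hvold p.1 p.2 hne] at hp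
          have hpq2 : p ∉ q := fun hx => hpq (List.mem_append.mpr (Or.inl hx))
          exact hvmark _ _ (h.closedx p hp hpq2 hpne q' hadj hok)
      · intro d' hd' hok
        rcases List.mem_append.mp hd' with hin | hin
        · exact hvmark _ _ (h.pdone d' hin hok)
        · have hde : d' = d := by simpa using hin
          subst hde
          exact hvnew
      · intro p
        constructor
        · intro hp
          rcases List.mem_append.mp hp with hin | hin
          · have := (h.accm p).mp hin
            exact ⟨hvmark _ _ this.1, this.2⟩
          · have : p = (nr, nc) := by simpa using hin
            subst this
            exact ⟨hvnew, h0new⟩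
        · rintro ⟨hm, h0⟩
          by_cases hh : p = (nr, nc)
          · exact List.mem_append.mpr (Or.inr (by simp [hh]))
          · have hne : ¬(p.1 = nr ∧ p.2 = nc) := by
              intro hcong
              exact hh (Prod.ext hcong.1 hcong.2)
            rw [hvold p.1 p.2 hne] at hm
            exact List.mem_append.mpr (Or.inl ((h.accm p).mpr ⟨hm, h0⟩))
      · have hnotin : (nr, nc) ∉ acc := by
          intro hmem
          have := ((h.accm (nr, nc)).mp hmem).1
          simp only at this
          rw [h6] at this
          cases this
        have hdisj : acc.Disjoint [(nr, nc)] := by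
          intro a ha hb
          have : a = (nr, nc) := by simpa using hb
          exact hnotin (this ▸ ha)
        exact List.Nodup.append h.accnd (List.nodup_singleton _) hdisj
    · have hlen : (q ++ [(nr, nc)]).length = q.length + 1 := by simp
      show 5 * pvU R C (fun p => v' p.1 p.2) + (q ++ [(nr, nc)]).length
          ≤ 5 * pvU R C (fun p => v p.1 p.2) + q.length
      rw [hlen]
      omega

lemma stepA (land : List (List Int)) (R C : Int) (seed : Int × Int) (v₀ : Int → Int → Bool)
    (cr cc : Int) (rest : List (Int × Int)) (v : Int → Int → Bool) (acc : List (Int × Int))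
    (inv : InvA land R C seed v₀ ((cr, cc) :: rest) v acc) :
    InvA land R C seed v₀
        (pvDirs.foldl (pvTryA land R C cr cc) (rest, v, acc)).1
        (pvDirs.foldl (pvTryA land R C cr cc) (rest, v, acc)).2.1
        (pvDirs.foldl (pvTryA land R C cr cc) (rest, v, acc)).2.2 ∧
      5 * pvU R C (fun p => (pvDirs.foldl (pvTryA land R C cr cc) (rest, v, acc)).2.1 p.1 p.2)
          + (pvDirs.foldl (pvTryA land R C cr cc) (rest, v, acc)).1.length + 1
        ≤ 5 * pvU R C (fun p => v p.1 p.2) + ((cr, cc) :: rest).length := by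
  have h0 : PartA land R C seed v₀ cr cc [] rest v acc := by
    have hpm : v cr cc = true := inv.qmark (cr, cc) List.mem_cons_self
    have hpr : pvReach land R C seed (cr, cc) := by
      rcases inv.src cr cc hpm with hz | hr
      · exact absurd hz (by simpa using inv.qnew (cr, cc) List.mem_cons_self)
      · exact hr
    refine ⟨inv.mono, inv.seedm, fun p hp => inv.qmark p (List.mem_cons_of_mem _ hp),
      fun p hp => inv.qnew p (List.mem_cons_of_mem _ hp), inv.src, inv.okm, hpm, hpr, ?_,
      by simp, inv.accm, inv.accnd⟩
    intro p hp hq hne q' hadj hok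
    refine inv.closed p hp ?_ q' hadj hok
    simp [List.mem_cons, hq, hne]
  simp only [pvDirs, List.foldl_cons, List.foldl_nil]
  have t1 := tryA_part land R C seed v₀ cr cc [] (-1, 0) (by simp [pvDirs]) rest v acc h0
  have t2 := tryA_part land R C seed v₀ cr cc _ (1, 0) (by simp [pvDirs]) _ _ _ t1.1
  have t3 := tryA_part land R C seed v₀ cr cc _ (0, -1) (by simp [pvDirs]) _ _ _ t2.1
  have t4 := tryA_part land R C seed v₀ cr cc _ (0, 1) (by simp [pvDirs]) _ _ _ t3.1
  simp only [Prod.mk.eta] at t1 t2 t3 t4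
  constructor
  · refine ⟨t4.1.mono, t4.1.seedm, t4.1.qmark, t4.1.qnew, t4.1.src, t4.1.okm, ?_, t4.1.accm,
      t4.1.accnd⟩
    intro p hp hq q' hadj hok
    by_cases hpc : p = (cr, cc)
    · rcases hadj with ⟨d, hd, rfl⟩
      subst hpc
      have hd' : d ∈ ((([] ++ [((-1 : Int), (0 : Int))]) ++ [((1 : Int), (0 : Int))])
          ++ [((0 : Int), (-1 : Int))]) ++ [((0 : Int), (1 : Int))] := by
        simpa [pvDirs] using hd
      exact t4.1.pdone d hd' hok
    · exact t4.1.closedx p hp hq hpc q' hadj hok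
  · have g1 := t1.2
    have g2 := t2.2
    have g3 := t3.2
    have g4 := t4.2
    simp only [List.length_cons]
    omega

lemma pvBfsA_run (land : List (List Int)) (R C : Int) (seed : Int × Int) (v₀ : Int → Int → Bool) :
    ∀ (fuel : Nat) (q : List (Int × Int)) (v : Int → Int → Bool) (acc : List (Int × Int)),
      InvA land R C seed v₀ q v acc →
      5 * pvU R C (fun p => v p.1 p.2) + q.length ≤ fuel →
      InvA land R C seed v₀ []
        (pvBfsA land R C fuel q v acc).1 (pvBfsA land R C fuel q v acc).2 := by
  intro fuel
  induction fuel with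
  | zero =>
    intro q v acc inv hf
    have hq : q = [] := List.eq_nil_of_length_eq_zero (by omega)
    subst hq
    simpa [pvBfsA] using inv
  | succ n ih =>
    intro q v acc inv hf
    match q with
    | [] => simpa [pvBfsA] using inv
    | (cr, cc) :: rest =>
      have h := stepA land R C seed v₀ cr cc rest v acc inv
      have hrec := ih _ _ _ h.1 (by
        have := h.2
        simp only [List.length_cons] at this hf ⊢
        omega)
      simpa [pvBfsA] using hrec

lemma finalA_marked (land : List (List Int)) (R C : Int) (seed : Int × Int)
    (v₀ v : Int → Int → Bool) (acc : List (Int × Int))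
    (inv : InvA land R C seed v₀ [] v acc) :
    ∀ p : Int × Int, v p.1 p.2 = true ↔ (v₀ p.1 p.2 = true ∨ pvReach land R C seed p) := by
  have hreach : ∀ p : Int × Int, pvReach land R C seed p → v p.1 p.2 = true := by
    intro p h
    induction h with
    | refl => exact inv.seedm
    | tail hr hstep ih =>
      rename_i b p'
      exact inv.closed b ih (List.not_mem_nil) p' hstep.1 hstep.2
  intro p
  constructor
  · exact inv.src p.1 p.2
  · rintro (h | h)
    · exact inv.mono p.1 p.2 h
    · exact hreach p h

-- ---------- A's ceiling dict and column sums ----------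

def pvColA (R : Int) (cl : PySem.Dict (Int × Int) Int) (c : Int) : Int :=
  (PySem.List.pyRange 0 R 1).foldl (fun oils r => oils + cl.getD (r, c) 0) 0

lemma toFinset_pyRange (R : Int) :
    (PySem.List.pyRange 0 R 1).toFinset = Finset.Ico (0 : ℤ) R := by
  ext x
  simp [PySem.List.mem_pyRange_one, Finset.mem_Ico]

lemma pvColA_sum (R : Int) (cl : PySem.Dict (Int × Int) Int) (c : Int) :
    pvColA R cl c = ∑ r ∈ Finset.Ico (0 : ℤ) R, cl.getD (r, c) 0 := by
  unfold pvColA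
  rw [PySem.List.foldl_add,
    ← List.sum_toFinset (fun r => cl.getD (r, c) 0) (PySem.List.nodup_pyRange_one 0 R),
    toFinset_pyRange]
  simp

lemma getD_foldl_swapins (ps : List (Int × Int)) (L : Int) (k : Int × Int) :
    ∀ d : PySem.Dict (Int × Int) Int,
      (ps.foldl (fun cl p => cl.insert (p.2, p.1) L) d).getD k 0
        = if (k.2, k.1) ∈ ps then L else d.getD k 0 := by
  induction ps with
  | nil => intro d; simp
  | cons a t ih =>
    intro d
    simp only [List.foldl_cons]
    rw [ih]
    by_cases ht : (k.2, k.1) ∈ t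
    · simp [ht]
    · by_cases hk : (k.2, k.1) = a
      · have hk' : k = (a.2, a.1) := by
          obtain ⟨x, y⟩ := k
          obtain ⟨u, w⟩ := a
          simp only [Prod.mk.injEq] at hk ⊢
          exact ⟨hk.2, hk.1⟩
        simp [List.mem_cons, ht, hk, PySem.Dict.getD_insert, hk']
      · have hk' : ¬ k = (a.2, a.1) := by
          intro hcon
          apply hk
          rw [hcon]
        simp [List.mem_cons, ht, hk, PySem.Dict.getD_insert, hk']

lemma get?_foldl_swapins (ps : List (Int × Int)) (L : Int) (k : Int × Int) :
    ∀ d : PySem.Dict (Int × Int) Int,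
      (ps.foldl (fun cl p => cl.insert (p.2, p.1) L) d).get? k
        = if (k.2, k.1) ∈ ps then some L else d.get? k := by
  induction ps with
  | nil => intro d; simp
  | cons a t ih =>
    intro d
    simp only [List.foldl_cons]
    rw [ih]
    by_cases ht : (k.2, k.1) ∈ t
    · simp [ht]
    · by_cases hk : (k.2, k.1) = a
      · have hk' : k = (a.2, a.1) := by
          obtain ⟨x, y⟩ := k
          obtain ⟨u, w⟩ := a
          simp only [Prod.mk.injEq] at hk ⊢
          exact ⟨hk.2, hk.1⟩
        simp [List.mem_cons, ht, hk, PySem.Dict.get?_insert, hk']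
      · have hk' : ¬ k = (a.2, a.1) := by
          intro hcon
          apply hk
          rw [hcon]
        simp [List.mem_cons, ht, hk, PySem.Dict.get?_insert, hk']

-- a_cluster_ceil: keys are exactly the columns of acc, every item's (value, key) is a cell of acc
lemma pvCeil_spec (R : Int) (acc : List (Int × Int)) (hok : ∀ p ∈ acc, 0 ≤ p.1 ∧ p.1 < R) :
    (pvCeil R acc).keys.Nodup ∧
    (∀ q ∈ (pvCeil R acc).items, (q.2, q.1) ∈ acc) ∧
    (∀ c, c ∈ (pvCeil R acc).keys ↔ ∃ r, (r, c) ∈ acc) := by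
  have main : ∀ (l : List (Int × Int)) (d : PySem.Dict Int Int),
      (∀ p ∈ l, p ∈ acc) →
      d.keys.Nodup →
      (∀ q ∈ d.items, (q.2, q.1) ∈ acc) →
      (∀ c ∈ d.keys, ∃ r, (r, c) ∈ acc) →
      (l.foldl (fun d p => d.insert p.2 (min p.1 (d.getD p.2 R))) d).keys.Nodup ∧
      (∀ q ∈ (l.foldl (fun d p => d.insert p.2 (min p.1 (d.getD p.2 R))) d).items,
        (q.2, q.1) ∈ acc) ∧
      (∀ c ∈ (l.foldl (fun d p => d.insert p.2 (min p.1 (d.getD p.2 R))) d).keys,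
        ∃ r, (r, c) ∈ acc) ∧
      (∀ c ∈ d.keys, c ∈ (l.foldl (fun d p => d.insert p.2 (min p.1 (d.getD p.2 R))) d).keys) ∧
      (∀ p ∈ l, p.2 ∈ (l.foldl (fun d p => d.insert p.2 (min p.1 (d.getD p.2 R))) d).keys) := by
    intro l
    induction l with
    | nil =>
      intro d hl hnd hitems hkeys
      exact ⟨hnd, hitems, hkeys, fun c hc => hc, by simp⟩
    | cons a t ih =>
      intro d hl hnd hitems hkeys
      simp only [List.foldl_cons]
      have hain : a ∈ acc := hl a List.mem_cons_self
      have hvalin : (min a.1 (d.getD a.2 R), a.2) ∈ acc := by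
        rcases min_choice a.1 (d.getD a.2 R) with hm | hm
        · rw [hm]
          simpa using hain
        · by_cases hcont : a.2 ∈ d.keys
          · have : (a.2, d.getD a.2 R) ∈ d.items := by
              rw [PySem.Dict.items_eq_map_keys d hnd R]
              exact List.mem_map.mpr ⟨a.2, hcont, rfl⟩
            have := hitems _ this
            simp only at this
            rw [hm]
            exact this
          · have hgd : d.getD a.2 R = R := by
              apply PySem.Dict.getD_of_not_contains
              rw [PySem.Dict.contains_eq_decide_mem_keys]
              simp [hcont]
            have hlt := (hok a hain).2
            have h0 := (hok a hain).1
            rw [hgd] at hm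
            have : min a.1 R = a.1 := min_eq_left (le_of_lt hlt)
            rw [hgd, this]
            simpa using hain
      have hstep : ∀ q ∈ (d.insert a.2 (min a.1 (d.getD a.2 R))).items, (q.2, q.1) ∈ acc := by
        intro q hq
        rcases (PySem.Dict.mem_items_insert _ _ _ _).mp hq with hq1 | hq2
        · rw [hq1]
          exact hvalin
        · exact hitems q hq2.1
      have hkstep : ∀ c ∈ (d.insert a.2 (min a.1 (d.getD a.2 R))).keys, ∃ r, (r, c) ∈ acc := by
        intro c hc
        rcases (PySem.Dict.mem_keys_insert _ _ _ _).mp hc with hc1 | hc2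
        · subst hc1
          exact ⟨a.1, by simpa using hain⟩
        · exact hkeys c hc2
      have hres := ih (d.insert a.2 (min a.1 (d.getD a.2 R)))
        (fun p hp => hl p (List.mem_cons_of_mem _ hp))
        (PySem.Dict.nodup_keys_insert _ _ _ hnd) hstep hkstep
      refine ⟨hres.1, hres.2.1, hres.2.2.1, ?_, ?_⟩
      · intro c hc
        exact hres.2.2.2.1 c ((PySem.Dict.mem_keys_insert _ _ _ _).mpr (Or.inr hc))
      · intro p hp
        rcases List.mem_cons.mp hp with hp1 | hp2
        · subst hp1
          exact hres.2.2.2.1 p.2 ((PySem.Dict.mem_keys_insert _ _ _ _).mpr (Or.inl rfl))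
        · exact hres.2.2.2.2 p hp2
  have h := main acc PySem.Dict.empty (fun p hp => hp) PySem.Dict.nodup_keys_empty
    (by
      intro q hq
      rw [show (PySem.Dict.empty : PySem.Dict Int Int).items = [] from rfl] at hq
      exact absurd hq List.not_mem_nil)
    (by
      intro c hc
      rw [show (PySem.Dict.empty : PySem.Dict Int Int).keys = [] from rfl] at hc
      exact absurd hc List.not_mem_nil)
  refine ⟨h.1, h.2.1, ?_⟩
  intro c
  constructor
  · exact h.2.2.1 c
  · rintro ⟨r, hr⟩
    have := h.2.2.2.2 (r, c) hr
    simpa using this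

-- how one cluster's ceiling entries change a column sum
lemma pvColA_foldl_swapins_pos (R : Int) (cl : PySem.Dict (Int × Int) Int)
    (acc : List (Int × Int)) (L : Int)
    (hok2 : ∀ p ∈ acc, 0 ≤ p.1 ∧ p.1 < R)
    (hz : ∀ p ∈ acc, cl.getD p 0 = 0) (c' : Int) (htouch : ∃ ρ, (ρ, c') ∈ acc) :
    pvColA R ((pvCeil R acc).items.foldl (fun cl' p => cl'.insert (p.2, p.1) L) cl) c'
      = L + pvColA R cl c' := by
  have ceilspec := pvCeil_spec R acc hok2
  have hgetD : ∀ k : Int × Int,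
      ((pvCeil R acc).items.foldl (fun cl' p => cl'.insert (p.2, p.1) L) cl).getD k 0
      = if (k.2, k.1) ∈ (pvCeil R acc).items then L else cl.getD k 0 :=
    fun k => getD_foldl_swapins _ _ k cl
  rw [pvColA_sum, pvColA_sum]
  obtain ⟨ρ, hρ⟩ := htouch
  have hkey : c' ∈ (pvCeil R acc).keys := (ceilspec.2.2 c').mpr ⟨ρ, hρ⟩
  have hnd : ((pvCeil R acc).items.map Prod.fst).Nodup := ceilspec.1
  obtain ⟨q0, hq0, hq0e⟩ := List.mem_map.mp hkey
  have hitem : (c', q0.2) ∈ (pvCeil R acc).items := by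
    rw [show (c', q0.2) = q0 from by rw [← hq0e]]
    exact hq0
  set ρ₀ := q0.2 with hρ₀
  have hcell0 : (ρ₀, c') ∈ acc := by
    have := ceilspec.2.1 (c', ρ₀) hitem
    simpa using this
  have huniq : ∀ x, (c', x) ∈ (pvCeil R acc).items → x = ρ₀ := by
    intro x hx
    have heq := List.inj_on_of_nodup_map hnd hx hitem (by simp)
    exact (Prod.mk.injEq _ _ _ _).mp heq |>.2
  have hρ0b := hok2 (ρ₀, c') hcell0
  have hρ0mem : ρ₀ ∈ Finset.Ico (0 : ℤ) R := Finset.mem_Ico.mpr ⟨hρ0b.1, hρ0b.2⟩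
  have hAnew : ∑ r' ∈ Finset.Ico (0 : ℤ) R,
      ((pvCeil R acc).items.foldl (fun cl' p => cl'.insert (p.2, p.1) L) cl).getD (r', c') 0
      = L + ∑ r' ∈ (Finset.Ico (0 : ℤ) R).erase ρ₀, cl.getD (r', c') 0 := by
    rw [← Finset.add_sum_erase _ _ hρ0mem]
    congr 1
    · rw [hgetD (ρ₀, c')]
      simp [hitem]
    · apply Finset.sum_congr rfl
      intro x hx
      rw [hgetD (x, c')]
      have hxne : x ≠ ρ₀ := (Finset.mem_erase.mp hx).1
      rw [if_neg]
      intro hmem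
      exact hxne (huniq x hmem)
  have hAold : ∑ r' ∈ Finset.Ico (0 : ℤ) R, cl.getD (r', c') 0
      = ∑ r' ∈ (Finset.Ico (0 : ℤ) R).erase ρ₀, cl.getD (r', c') 0 := by
    rw [← Finset.add_sum_erase _ _ hρ0mem, hz (ρ₀, c') hcell0, zero_add]
  rw [hAnew, hAold]

lemma pvColA_foldl_swapins_neg (R : Int) (cl : PySem.Dict (Int × Int) Int)
    (acc : List (Int × Int)) (L : Int)
    (hok2 : ∀ p ∈ acc, 0 ≤ p.1 ∧ p.1 < R)
    (c' : Int) (htouch : ¬ ∃ ρ, (ρ, c') ∈ acc) :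
    pvColA R ((pvCeil R acc).items.foldl (fun cl' p => cl'.insert (p.2, p.1) L) cl) c'
      = pvColA R cl c' := by
  have ceilspec := pvCeil_spec R acc hok2
  have hgetD : ∀ k : Int × Int,
      ((pvCeil R acc).items.foldl (fun cl' p => cl'.insert (p.2, p.1) L) cl).getD k 0
      = if (k.2, k.1) ∈ (pvCeil R acc).items then L else cl.getD k 0 :=
    fun k => getD_foldl_swapins _ _ k cl
  rw [pvColA_sum, pvColA_sum]
  apply Finset.sum_congr rfl
  intro x _
  rw [hgetD (x, c'), if_neg]
  intro hmem
  exact htouch ⟨x, by simpa using ceilspec.2.1 (c', x) hmem⟩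

lemma maxFold_eq (l : List Int) (f g : Int → Int) (hfg : ∀ c ∈ l, f c = g c) :
    l.foldl (fun m c => max (f c) m) (-1) = l.foldl (fun m c => max m (g c)) (-1) := by
  apply PySem.List.foldl_congr_mem
  intro acc x hx
  rw [max_comm, hfg x hx]

-- ---------- A's outer loop: absolute invariant ----------

-- p is connected to some oil cell of column c
def pvConnCol (land : List (List Int)) (R C : Int) (p : Int × Int) (c : Int) : Prop :=
  ∃ ρ, pvOk land R C (ρ, c) ∧ pvReach land R C p (ρ, c)

structure OuterInvA (land : List (List Int)) (R C : Int) (v : Int → Int → Bool)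
    (cl : PySem.Dict (Int × Int) Int) : Prop where
  vok : ∀ r c, v r c = true → pvOk land R C (r, c)
  vclosed : ∀ p : Int × Int, v p.1 p.2 = true →
      ∀ q, pvAdj p q → pvOk land R C q → v q.1 q.2 = true
  keysMarked : ∀ k w, cl.get? k = some w → v k.1 k.2 = true
  clNodup : cl.keys.Nodup
  colsum : ∀ c, ∃ L : List (Int × Int), L.Nodup ∧
      (∀ p : Int × Int, p ∈ L ↔ (v p.1 p.2 = true ∧ pvConnCol land R C p c)) ∧
      pvColA R cl c = (L.length : Int)

def pvCellStepA (land : List (List Int)) (R C r c : Int)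
    (st : (Int → Int → Bool) × PySem.Dict (Int × Int) Int) :
    (Int → Int → Bool) × PySem.Dict (Int × Int) Int :=
  if pvCell land r c = 1 ∧ st.1 r c = false then
    let v1 : Int → Int → Bool := fun r' c' => if r' = r ∧ c' = c then true else st.1 r' c'
    let res := pvBfsA land R C (5 * R.toNat * C.toNat + 1) [(r, c)] v1 [(r, c)]
    (res.1,
      (pvCeil R res.2).items.foldl
        (fun cl p => cl.insert (p.2, p.1) ((res.2.length : Nat) : Int)) st.2)
  else st

def pvRunA (land : List (List Int)) : (Int → Int → Bool) × PySem.Dict (Int × Int) Int :=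
  (PySem.List.pyRange 0 (land.length : Int) 1).foldl
    (fun st r => (PySem.List.pyRange 0 (land.headI.length : Int) 1).foldl
      (fun st c => pvCellStepA land (land.length : Int) (land.headI.length : Int) r c st) st)
    ((fun _ _ => false), PySem.Dict.empty)

lemma solution_unfold (land : List (List Int)) :
    solution land =
      (PySem.List.pyRange 0 (land.headI.length : Int) 1).foldl
        (fun m c => max (pvColA (land.length : Int) (pvRunA land).2 c) m) (-1) := rfl

def pvColLen (land : List (List Int)) (c : Int) : Int :=
  ((pvFloodB land (land.length : Int) (land.headI.length : Int)
      (5 * (land.length : Int).toNat * (land.headI.length : Int).toNat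
        + (land.length : Int).toNat + 1)
      (pvSeeds land (land.length : Int) c)
      (PySem.Set.ofList (pvSeeds land (land.length : Int) c))).length : Int)

lemma solution_alt_unfold (land : List (List Int)) :
    solution_alt land =
      (PySem.List.pyRange 0 (land.headI.length : Int) 1).foldl
        (fun best c => max best (pvColLen land c)) (-1) := rfl

lemma outerInitA (land : List (List Int)) (R C : Int) :
    OuterInvA land R C (fun _ _ => false) PySem.Dict.empty := by
  refine ⟨by simp, by simp, ?_, PySem.Dict.nodup_keys_empty, ?_⟩
  · intro k w hk
    rw [PySem.Dict.get?_empty] at hk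
    cases hk
  · intro c
    refine ⟨[], List.nodup_nil, by simp, ?_⟩
    rw [pvColA_sum]
    simp [PySem.Dict.getD_empty]

lemma cellStepA_all (land : List (List Int)) (R C r c : Int)
    (hr1 : 0 ≤ r) (hr2 : r < R) (hc1 : 0 ≤ c) (hc2 : c < C)
    (v : Int → Int → Bool) (cl : PySem.Dict (Int × Int) Int)
    (inv : OuterInvA land R C v cl) :
    OuterInvA land R C (pvCellStepA land R C r c (v, cl)).1
        (pvCellStepA land R C r c (v, cl)).2 ∧
      (∀ r' c', v r' c' = true → (pvCellStepA land R C r c (v, cl)).1 r' c' = true) ∧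
      (pvCell land r c = 1 → (pvCellStepA land R C r c (v, cl)).1 r c = true) := by
  by_cases hcond : pvCell land r c = 1 ∧ v r c = false
  case neg =>
    have heA : pvCellStepA land R C r c (v, cl) = (v, cl) := by
      simp only [pvCellStepA]
      rw [if_neg hcond]
    rw [heA]
    refine ⟨inv, fun _ _ h => h, ?_⟩
    intro hcell
    by_cases hv : v r c = true
    · exact hv
    · exact absurd ⟨hcell, by simpa using hv⟩ hcond
  case pos =>
    obtain ⟨hcell, hunm⟩ := hcond
    have hseedok : pvOk land R C (r, c) := ⟨hr1, hr2, hc1, hc2, hcell⟩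
    set v1 : Int → Int → Bool := fun r' c' => if r' = r ∧ c' = c then true else v r' c' with hv1
    set resA := pvBfsA land R C (5 * R.toNat * C.toNat + 1) [(r, c)] v1 [(r, c)] with hresA
    have heA : pvCellStepA land R C r c (v, cl)
        = (resA.1, (pvCeil R resA.2).items.foldl
            (fun cl' p => cl'.insert (p.2, p.1) ((resA.2.length : Nat) : Int)) cl) := by
      simp only [pvCellStepA]
      rw [if_pos ⟨hcell, hunm⟩]
    rw [heA]
    dsimp only
    have hv1mark : ∀ r' c', v r' c' = true → v1 r' c' = true := by
      intro r' c' h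
      by_cases hh : r' = r ∧ c' = c <;> simp [hv1, hh, h]
    have hv1old : ∀ r' c', ¬(r' = r ∧ c' = c) → v1 r' c' = v r' c' := by
      intro r' c' hh
      simp [hv1, hh]
    have invA0 : InvA land R C (r, c) v [(r, c)] v1 [(r, c)] := by
      refine ⟨hv1mark, by simp [hv1], ?_, ?_, ?_, ?_, ?_, ?_, List.nodup_singleton _⟩
      · intro p hp
        have : p = (r, c) := by simpa using hp
        subst this
        simp [hv1]
      · intro p hp
        have : p = (r, c) := by simpa using hp
        subst this
        exact hunm
      · intro r' c' h
        by_cases hh : r' = r ∧ c' = c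
        · right
          rw [hh.1, hh.2]
          exact Relation.ReflTransGen.refl
        · rw [hv1old r' c' hh] at h
          exact Or.inl h
      · intro r' c' h
        by_cases hh : r' = r ∧ c' = c
        · rw [hh.1, hh.2]
          exact hseedok
        · rw [hv1old r' c' hh] at h
          exact inv.vok r' c' h
      · intro p hp hpq q' hadj hok
        have hpne : ¬(p.1 = r ∧ p.2 = c) := by
          intro hcong
          have hpe : p = (r, c) := Prod.ext_iff.mpr ⟨hcong.1, hcong.2⟩
          exact hpq (by simp [hpe])
        rw [hv1old p.1 p.2 hpne] at hp
        exact hv1mark _ _ (inv.vclosed p hp q' hadj hok)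
      · intro p
        constructor
        · intro hp
          have : p = (r, c) := by simpa using hp
          subst this
          exact ⟨by simp [hv1], hunm⟩
        · rintro ⟨hm, h0⟩
          by_cases hh : p.1 = r ∧ p.2 = c
          · have hpe : p = (r, c) := Prod.ext_iff.mpr ⟨hh.1, hh.2⟩
            simp [hpe]
          · rw [hv1old p.1 p.2 hh] at hm
            rw [hm] at h0
            cases h0
    have hfuelA : 5 * pvU R C (fun p => v1 p.1 p.2) + ([(r, c)] : List (Int × Int)).length
        ≤ 5 * R.toNat * C.toNat + 1 := by
      have := pvU_le R C (fun p => v1 p.1 p.2)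
      simp only [List.length_cons, List.length_nil]
      have h5 : 5 * pvU R C (fun p => v1 p.1 p.2) ≤ 5 * (R.toNat * C.toNat) :=
        Nat.mul_le_mul_left 5 this
      have hassoc : 5 * R.toNat * C.toNat = 5 * (R.toNat * C.toNat) := Nat.mul_assoc 5 _ _
      omega
    have finvA : InvA land R C (r, c) v [] resA.1 resA.2 :=
      pvBfsA_run land R C (r, c) v (5 * R.toNat * C.toNat + 1) [(r, c)] v1 [(r, c)] invA0 hfuelA
    have hMA := finalA_marked land R C (r, c) v resA.1 resA.2 finvA
    -- cells of the new cluster were unmarked before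
    have hnew_unm : ∀ p : Int × Int, pvReach land R C (r, c) p → v p.1 p.2 = false := by
      intro p hre
      by_cases hv : v p.1 p.2 = true
      · have hback := pvReach_symm land R C (r, c) p hseedok hre
        have hrc := vclosed_reach land R C v inv.vclosed p (r, c) hv hback
        simp only at hrc
        rw [hunm] at hrc
        cases hrc
      · simpa using hv
    -- a_cluster is exactly the component of the seed
    have haccmem : ∀ p : Int × Int, p ∈ resA.2 ↔ pvReach land R C (r, c) p := by
      intro p
      rw [finvA.accm p]
      constructor
      · rintro ⟨hm, h0⟩
        rcases (hMA p).mp hm with h | h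
        · rw [h0] at h
          cases h
        · exact h
      · intro h
        exact ⟨(hMA p).mpr (Or.inr h), hnew_unm p h⟩
    have hok2 : ∀ p ∈ resA.2, 0 ≤ p.1 ∧ p.1 < R := by
      intro p hp
      have hm := ((finvA.accm p).mp hp).1
      have := finvA.okm p.1 p.2 hm
      exact ⟨this.1, this.2.1⟩
    refine ⟨⟨fun r' c' h => finvA.okm r' c' h,
      fun p hp q' hadj hok => finvA.closed p hp List.not_mem_nil q' hadj hok,
      ?_, ?_, ?_⟩, ?_, ?_⟩
    · -- keysMarked
      intro k w hk
      rw [get?_foldl_swapins] at hk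
      by_cases hin : (k.2, k.1) ∈ (pvCeil R resA.2).items
      · have hcellmem := (pvCeil_spec R resA.2 hok2).2.1 (k.2, k.1) hin
        simp only at hcellmem
        exact ((finvA.accm k).mp hcellmem).1
      · rw [if_neg hin] at hk
        exact finvA.mono k.1 k.2 (inv.keysMarked k w hk)
    · exact PySem.Dict.nodup_keys_foldl_insert_key _ (fun p : Int × Int => (p.2, p.1))
        (fun _ _ => ((resA.2.length : Nat) : Int)) cl inv.clNodup
    · -- colsum
      intro c'
      obtain ⟨L, hLnd, hLmem, hLlen⟩ := inv.colsum c'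
      have hz : ∀ p ∈ resA.2, cl.getD p 0 = 0 := by
        intro p hp
        cases hq : cl.get? p with
        | none => exact PySem.Dict.getD_of_get?_eq_none _ _ hq
        | some w =>
          have hv0 : v p.1 p.2 = true := inv.keysMarked _ w hq
          have := hnew_unm p ((haccmem p).mp hp)
          rw [this] at hv0
          cases hv0
      by_cases hmeets : pvConnCol land R C (r, c) c'
      · -- this cluster touches column c': the whole cluster joins the column's reach set
        refine ⟨L ++ resA.2, ?_, ?_, ?_⟩
        · have hdisj : ∀ a ∈ L, a ∉ resA.2 := by
            intro a haL haA
            have hva := ((hLmem a).mp haL).1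
            have := hnew_unm a ((haccmem a).mp haA)
            rw [this] at hva
            cases hva
          exact List.Nodup.append hLnd finvA.accnd (List.disjoint_left.mpr hdisj)
        · intro p
          rw [List.mem_append, hLmem p, haccmem p]
          constructor
          · rintro (⟨hv, hconn⟩ | hre)
            · exact ⟨(hMA p).mpr (Or.inl hv), hconn⟩
            · obtain ⟨ρ, hokρ, hreρ⟩ := hmeets
              refine ⟨(hMA p).mpr (Or.inr hre), ρ, hokρ, ?_⟩
              exact Relation.ReflTransGen.trans
                (pvReach_symm land R C (r, c) p hseedok hre) hreρ
          · rintro ⟨hm, hconn⟩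
            rcases (hMA p).mp hm with hv | hre
            · exact Or.inl ⟨hv, hconn⟩
            · exact Or.inr hre
        · have htouch : ∃ ρ, (ρ, c') ∈ resA.2 := by
            obtain ⟨ρ, hokρ, hreρ⟩ := hmeets
            exact ⟨ρ, (haccmem (ρ, c')).mpr hreρ⟩
          rw [pvColA_foldl_swapins_pos R cl resA.2 ((resA.2.length : Nat) : Int) hok2 hz c'
            htouch, hLlen, List.length_append]
          push_cast
          ring
      · -- this cluster misses column c': the column sum and reach set are unchanged
        refine ⟨L, hLnd, ?_, ?_⟩
        · intro p
          rw [hLmem p]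
          constructor
          · rintro ⟨hv, hconn⟩
            exact ⟨(hMA p).mpr (Or.inl hv), hconn⟩
          · rintro ⟨hm, hconn⟩
            rcases (hMA p).mp hm with hv | hre
            · exact ⟨hv, hconn⟩
            · exfalso
              apply hmeets
              obtain ⟨ρ, hokρ, hreρ⟩ := hconn
              exact ⟨ρ, hokρ, Relation.ReflTransGen.trans hre hreρ⟩
        · have htouch : ¬ ∃ ρ, (ρ, c') ∈ resA.2 := by
            rintro ⟨ρ, hρ⟩
            apply hmeets
            have hre := (haccmem (ρ, c')).mp hρ
            have hokρ : pvOk land R C (ρ, c') := pvReach_ok land R C (r, c) _ hre hseedok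
            exact ⟨ρ, hokρ, hre⟩
          rw [pvColA_foldl_swapins_neg R cl resA.2 ((resA.2.length : Nat) : Int) hok2 c'
            htouch, hLlen]
    · exact fun r' c' h => finvA.mono r' c' h
    · intro _
      exact (hMA (r, c)).mpr (Or.inr Relation.ReflTransGen.refl)

lemma foldColsA (land : List (List Int)) (R C r : Int) (hr1 : 0 ≤ r) (hr2 : r < R) :
    ∀ (cols : List Int), (∀ c' ∈ cols, 0 ≤ c' ∧ c' < C) →
    ∀ (st : (Int → Int → Bool) × PySem.Dict (Int × Int) Int), OuterInvA land R C st.1 st.2 →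
      OuterInvA land R C (cols.foldl (fun st c => pvCellStepA land R C r c st) st).1
          (cols.foldl (fun st c => pvCellStepA land R C r c st) st).2 ∧
        (∀ r' c', st.1 r' c' = true →
          (cols.foldl (fun st c => pvCellStepA land R C r c st) st).1 r' c' = true) ∧
        (∀ c' ∈ cols, pvCell land r c' = 1 →
          (cols.foldl (fun st c => pvCellStepA land R C r c st) st).1 r c' = true) := by
  intro cols
  induction cols with
  | nil =>
    intro _ st inv
    exact ⟨inv, fun _ _ h => h, by simp⟩
  | cons c0 t ih =>
    intro hb st inv
    have hc0 := hb c0 List.mem_cons_self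
    have h0 := cellStepA_all land R C r c0 hr1 hr2 hc0.1 hc0.2 st.1 st.2 inv
    simp only [Prod.mk.eta] at h0
    have hrec := ih (fun c hc => hb c (List.mem_cons_of_mem _ hc))
      (pvCellStepA land R C r c0 st) h0.1
    simp only [List.foldl_cons]
    refine ⟨hrec.1, ?_, ?_⟩
    · intro r' c' h
      exact hrec.2.1 r' c' (h0.2.1 r' c' h)
    · intro c' hc' hcell
      rcases List.mem_cons.mp hc' with hc' | hc'
    
      · subst hc'
        exact hrec.2.1 r c' (h0.2.2 hcell)
      · exact hrec.2.2 c' hc' hcell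

lemma foldRowsA (land : List (List Int)) (R C : Int) :
    ∀ (rows : List Int), (∀ r ∈ rows, 0 ≤ r ∧ r < R) →
    ∀ (cols : List Int), (∀ c' ∈ cols, 0 ≤ c' ∧ c' < C) →
    ∀ (st : (Int → Int → Bool) × PySem.Dict (Int × Int) Int), OuterInvA land R C st.1 st.2 →
      OuterInvA land R C
          (rows.foldl (fun st r => cols.foldl (fun st c => pvCellStepA land R C r c st) st) st).1
          (rows.foldl (fun st r => cols.foldl (fun st c => pvCellStepA land R C r c st) st) st).2 ∧
        (∀ r' c', st.1 r' c' = true →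
          (rows.foldl (fun st r => cols.foldl (fun st c => pvCellStepA land R C r c st) st)
            st).1 r' c' = true) ∧
        (∀ r ∈ rows, ∀ c' ∈ cols, pvCell land r c' = 1 →
          (rows.foldl (fun st r => cols.foldl (fun st c => pvCellStepA land R C r c st) st)
            st).1 r c' = true) := by
  intro rows
  induction rows with
  | nil =>
    intro _ cols _ st inv
    exact ⟨inv, fun _ _ h => h, by simp⟩
  | cons r0 t ih =>
    intro hb cols hcols st inv
    have hr0 := hb r0 List.mem_cons_self
    have h0 := foldColsA land R C r0 hr0.1 hr0.2 cols hcols st inv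
    have hrec := ih (fun r hr => hb r (List.mem_cons_of_mem _ hr)) cols hcols
      (cols.foldl (fun st c => pvCellStepA land R C r0 c st) st) h0.1
    simp only [List.foldl_cons]
    refine ⟨hrec.1, ?_, ?_⟩
    · intro r' c' h
      exact hrec.2.1 r' c' (h0.2.1 r' c' h)
    · intro r hr c' hc' hcell
      rcases List.mem_cons.mp hr with hr | hr
      · subst hr
        exact hrec.2.1 r c' (h0.2.2 c' hc' hcell)
      · exact hrec.2.2 r hr c' hc' hcell

-- ---------- B's per-column flood invariant ----------

structure InvS (land : List (List Int)) (R C : Int)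
    (seeds q seen : List (Int × Int)) : Prop where
  nd : seen.Nodup
  qmem : ∀ p ∈ q, p ∈ seen
  seedm : ∀ p ∈ seeds, p ∈ seen
  okm : ∀ p ∈ seen, pvOk land R C p
  src : ∀ p ∈ seen, ∃ s0 ∈ seeds, pvReach land R C s0 p
  closed : ∀ p ∈ seen, p ∉ q → ∀ q', pvAdj p q' → pvOk land R C q' → q' ∈ seen

structure PartS (land : List (List Int)) (R C : Int) (seeds : List (Int × Int))
    (cr cc : Int) (done q seen : List (Int × Int)) : Prop where
  nd : seen.Nodup
  qmem : ∀ p ∈ q, p ∈ seen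
  seedm : ∀ p ∈ seeds, p ∈ seen
  okm : ∀ p ∈ seen, pvOk land R C p
  src : ∀ p ∈ seen, ∃ s0 ∈ seeds, pvReach land R C s0 p
  popm : (cr, cc) ∈ seen
  popsrc : ∃ s0 ∈ seeds, pvReach land R C s0 (cr, cc)
  closedx : ∀ p ∈ seen, p ∉ q → p ≠ (cr, cc) → ∀ q', pvAdj p q' → pvOk land R C q' → q' ∈ seen
  pdone : ∀ n ∈ done, pvOk land R C n → n ∈ seen

lemma tryS (land : List (List Int)) (R C : Int) (seeds : List (Int × Int)) (cr cc : Int)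
    (done : List (Int × Int)) (n : Int × Int) (hadj : pvAdj (cr, cc) n)
    (q seen : List (Int × Int)) (h : PartS land R C seeds cr cc done q seen) :
    PartS land R C seeds cr cc (done ++ [n])
        (pvStepB land R C (q, seen) n).1 (pvStepB land R C (q, seen) n).2 ∧
      5 * pvU R C (fun p => decide (p ∈ (pvStepB land R C (q, seen) n).2))
          + (pvStepB land R C (q, seen) n).1.length
        ≤ 5 * pvU R C (fun p => decide (p ∈ seen)) + q.length := by
  by_cases hc : 0 ≤ n.1 ∧ n.1 < R ∧ 0 ≤ n.2 ∧ n.2 < C ∧ pvCell land n.1 n.2 = 1 ∧ ¬ n ∈ seen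
  case neg =>
    have he : pvStepB land R C (q, seen) n = (q, seen) := by
      simp only [pvStepB]
      rw [if_neg hc]
    rw [he]
    refine ⟨⟨h.nd, h.qmem, h.seedm, h.okm, h.src, h.popm, h.popsrc, h.closedx, ?_⟩, le_refl _⟩
    intro m hm hok
    rcases List.mem_append.mp hm with hm | hm
    · exact h.pdone m hm hok
    · have : m = n := by simpa using hm
      subst this
      by_cases hmem : m ∈ seen
      · exact hmem
      · exact absurd ⟨hok.1, hok.2.1, hok.2.2.1, hok.2.2.2.1, hok.2.2.2.2, hmem⟩ hc
  case pos =>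
    obtain ⟨h1, h2, h3, h4, h5, h6⟩ := hc
    have hnok : pvOk land R C n := ⟨h1, h2, h3, h4, h5⟩
    have he : pvStepB land R C (q, seen) n = (n :: q, PySem.Set.add seen n) := by
      simp only [pvStepB]
      rw [if_pos ⟨h1, h2, h3, h4, h5, h6⟩]
    rw [he]
    dsimp only
    have hmm : ∀ x : Int × Int, x ∈ PySem.Set.add seen n ↔ x ∈ seen ∨ x = n := by
      intro x
      rw [PySem.Set.mem_add]
    have hreach : ∃ s0 ∈ seeds, pvReach land R C s0 n := by
      obtain ⟨s0, hs0, hr⟩ := h.popsrc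
      exact ⟨s0, hs0, hr.tail ⟨hadj, hnok⟩⟩
    constructor
    · refine ⟨PySem.Set.nodup_add seen n h.nd, ?_, ?_, ?_, ?_, ?_, h.popsrc, ?_, ?_⟩
      · intro p hp
        rcases List.mem_cons.mp hp with h' | h'
        · subst h'
          exact (hmm p).mpr (Or.inr rfl)
        · exact (hmm p).mpr (Or.inl (h.qmem p h'))
      · intro p hp
        exact (hmm p).mpr (Or.inl (h.seedm p hp))
      · intro p hp
        rcases (hmm p).mp hp with h' | rfl
        · exact h.okm p h'
        · exact hnok
      · intro p hp
        rcases (hmm p).mp hp with h' | rfl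
        · exact h.src p h'
        · exact hreach
      · exact (hmm _).mpr (Or.inl h.popm)
      · intro p hp hpq hpne q' hadj' hok'
        rcases (hmm p).mp hp with h' | rfl
        · have hq : p ∉ q := fun hx => hpq (List.mem_cons_of_mem _ hx)
          exact (hmm q').mpr (Or.inl (h.closedx p h' hq hpne q' hadj' hok'))
        · exact absurd List.mem_cons_self hpq
      · intro m hm hok'
        rcases List.mem_append.mp hm with hm | hm
        · exact (hmm m).mpr (Or.inl (h.pdone m hm hok'))
        · have : m = n := by simpa using hm
          subst this
          exact (hmm m).mpr (Or.inr rfl)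
    · have hU : pvU R C (fun p => decide (p ∈ seen))
          = pvU R C (fun p => decide (p ∈ PySem.Set.add seen n)) + 1 := by
        refine pvU_mark R C _ _ n h1 h2 h3 h4 (by simp [h6]) ?_
        intro x
        by_cases hx : x = n
        · subst hx
          simp [hmm x]
        · simp [hmm x, hx]
      simp only [List.length_cons]
      omega

lemma stepS (land : List (List Int)) (R C : Int) (seeds : List (Int × Int)) (cr cc : Int)
    (rest seen : List (Int × Int)) (inv : InvS land R C seeds ((cr, cc) :: rest) seen) :
    InvS land R C seeds
        ((pvNbrs cr cc).foldl (pvStepB land R C) (rest, seen)).1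
        ((pvNbrs cr cc).foldl (pvStepB land R C) (rest, seen)).2 ∧
      5 * pvU R C (fun p => decide (p ∈ ((pvNbrs cr cc).foldl (pvStepB land R C) (rest, seen)).2))
          + ((pvNbrs cr cc).foldl (pvStepB land R C) (rest, seen)).1.length + 1
        ≤ 5 * pvU R C (fun p => decide (p ∈ seen)) + ((cr, cc) :: rest).length := by
  have h0 : PartS land R C seeds cr cc [] rest seen := by
    have hpm : (cr, cc) ∈ seen := inv.qmem (cr, cc) List.mem_cons_self
    refine ⟨inv.nd, fun p hp => inv.qmem p (List.mem_cons_of_mem _ hp), inv.seedm, inv.okm,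
      inv.src, hpm, inv.src _ hpm, ?_, by simp⟩
    intro p hp hq hne q' hadj hok
    refine inv.closed p hp ?_ q' hadj hok
    simp [List.mem_cons, hq, hne]
  have hadj1 : pvAdj (cr, cc) (cr - 1, cc) :=
    ⟨(-1, 0), by norm_num [pvDirs], Prod.ext_iff.mpr ⟨by ring, by ring⟩⟩
  have hadj2 : pvAdj (cr, cc) (cr + 1, cc) :=
    ⟨(1, 0), by norm_num [pvDirs], Prod.ext_iff.mpr ⟨by ring, by ring⟩⟩
  have hadj3 : pvAdj (cr, cc) (cr, cc - 1) :=
    ⟨(0, -1), by norm_num [pvDirs], Prod.ext_iff.mpr ⟨by ring, by ring⟩⟩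
  have hadj4 : pvAdj (cr, cc) (cr, cc + 1) :=
    ⟨(0, 1), by norm_num [pvDirs], Prod.ext_iff.mpr ⟨by ring, by ring⟩⟩
  simp only [pvNbrs, List.foldl_cons, List.foldl_nil]
  have t1 := tryS land R C seeds cr cc [] (cr - 1, cc) hadj1 rest seen h0
  have t2 := tryS land R C seeds cr cc _ (cr + 1, cc) hadj2 _ _ t1.1
  have t3 := tryS land R C seeds cr cc _ (cr, cc - 1) hadj3 _ _ t2.1
  have t4 := tryS land R C seeds cr cc _ (cr, cc + 1) hadj4 _ _ t3.1
  simp only [Prod.mk.eta] at t1 t2 t3 t4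
  constructor
  · refine ⟨t4.1.nd, t4.1.qmem, t4.1.seedm, t4.1.okm, t4.1.src, ?_⟩
    intro p hp hpq q' hadj hok
    by_cases hpc : p = (cr, cc)
    · subst hpc
      obtain ⟨d, hd, rfl⟩ := hadj
      simp only [pvDirs, List.mem_cons, List.not_mem_nil, or_false] at hd
      have hd' : ((cr, cc).1 + d.1, (cr, cc).2 + d.2)
          ∈ ((([] ++ [(cr - 1, cc)]) ++ [(cr + 1, cc)]) ++ [(cr, cc - 1)]) ++ [(cr, cc + 1)] := by
        rcases hd with h | h | h | h <;> subst h <;>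
          simp [Prod.ext_iff] <;> ring_nf <;> simp
      exact t4.1.pdone _ hd' hok
    · exact t4.1.closedx p hp hpq hpc q' hadj hok
  · have chain := le_trans t4.2 (le_trans t3.2 (le_trans t2.2 t1.2))
    simp only [List.length_cons]
    exact Nat.add_le_add_right chain 1

lemma pvFloodB_run (land : List (List Int)) (R C : Int) (seeds : List (Int × Int)) :
    ∀ (fuel : Nat) (q seen : List (Int × Int)),
      InvS land R C seeds q seen →
      5 * pvU R C (fun p => decide (p ∈ seen)) + q.length ≤ fuel →
      InvS land R C seeds [] (pvFloodB land R C fuel q seen) := by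
  intro fuel
  induction fuel with
  | zero =>
    intro q seen inv hf
    have hq : q = [] := List.eq_nil_of_length_eq_zero (by omega)
    subst hq
    simpa [pvFloodB] using inv
  | succ m ih =>
    intro q seen inv hf
    match q with
    | [] => simpa [pvFloodB] using inv
    | (cr, cc) :: rest =>
      have h := stepS land R C seeds cr cc rest seen inv
      have hrec := ih _ _ h.1 (by
        have := h.2
        simp only [List.length_cons] at this hf ⊢
        omega)
      simpa [pvFloodB] using hrec

lemma finalS_mem (land : List (List Int)) (R C : Int) (seeds seen : List (Int × Int))
    (inv : InvS land R C seeds [] seen) :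
    ∀ p : Int × Int, p ∈ seen ↔ ∃ s0 ∈ seeds, pvReach land R C s0 p := by
  have hre : ∀ s0 p : Int × Int, s0 ∈ seeds → pvReach land R C s0 p → p ∈ seen := by
    intro s0 p hs0 h
    induction h with
    | refl => exact inv.seedm s0 hs0
    | tail hr hstep ih => exact inv.closed _ ih (List.not_mem_nil) _ hstep.1 hstep.2
  intro p
  exact ⟨inv.src p, fun ⟨s0, hs0, h⟩ => hre s0 p hs0 h⟩

lemma seeds_mem (land : List (List Int)) (R c : Int) (p : Int × Int) :
    p ∈ pvSeeds land R c ↔ (0 ≤ p.1 ∧ p.1 < R ∧ pvCell land p.1 c = 1 ∧ p.2 = c) := by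
  simp only [pvSeeds, List.mem_map, List.mem_filter, PySem.List.mem_pyRange_one, beq_iff_eq]
  constructor
  · rintro ⟨r, ⟨⟨hr1, hr2⟩, hcell⟩, rfl⟩
    exact ⟨hr1, hr2, hcell, rfl⟩
  · rintro ⟨h1, h2, h3, h4⟩
    exact ⟨p.1, ⟨⟨h1, h2⟩, h3⟩, by rw [← h4]⟩

lemma seeds_len (land : List (List Int)) (R c : Int) :
    (pvSeeds land R c).length ≤ R.toNat := by
  have h1 : (pvSeeds land R c).length
      ≤ (PySem.List.pyRange 0 R 1).length := by
    rw [pvSeeds, List.length_map]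
    exact List.length_filter_le _ _
  rw [PySem.List.length_pyRange_one] at h1
  omega

-- ---------- final assembly ----------

lemma colEq (land : List (List Int)) (vf : Int → Int → Bool)
    (cl : PySem.Dict (Int × Int) Int)
    (inv : OuterInvA land (land.length : Int) (land.headI.length : Int) vf cl)
    (hmark : ∀ p : Int × Int, pvOk land (land.length : Int) (land.headI.length : Int) p →
      vf p.1 p.2 = true)
    (c : Int) (hc1 : 0 ≤ c) (hc2 : c < (land.headI.length : Int)) :
    pvColA (land.length : Int) cl c = pvColLen land c := by
  set R : Int := (land.length : Int) with hR
  set C : Int := (land.headI.length : Int) with hC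
  set seeds := pvSeeds land R c with hseeds
  have hseedok : ∀ p ∈ seeds, pvOk land R C p := by
    intro p hp
    obtain ⟨h1, h2, h3, h4⟩ := (seeds_mem land R c p).mp hp
    exact ⟨h1, h2, by rw [h4]; exact hc1, by rw [h4]; exact hc2, by rw [h4]; exact h3⟩
  have inv0 : InvS land R C seeds seeds (PySem.Set.ofList seeds) := by
    refine ⟨PySem.Set.nodup_ofList seeds, ?_, ?_, ?_, ?_, ?_⟩
    · intro p hp
      exact (PySem.Set.mem_ofList seeds p).mpr hp
    · intro p hp
      exact (PySem.Set.mem_ofList seeds p).mpr hp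
    · intro p hp
      exact hseedok p ((PySem.Set.mem_ofList seeds p).mp hp)
    · intro p hp
      exact ⟨p, (PySem.Set.mem_ofList seeds p).mp hp, Relation.ReflTransGen.refl⟩
    · intro p hp hq
      exact absurd ((PySem.Set.mem_ofList seeds p).mp hp) hq
  have hfuel : 5 * pvU R C (fun p => decide (p ∈ PySem.Set.ofList seeds)) + seeds.length
      ≤ 5 * R.toNat * C.toNat + R.toNat + 1 := by
    have hu := pvU_le R C (fun p => decide (p ∈ PySem.Set.ofList seeds))
    have hs : seeds.length ≤ R.toNat := seeds_len land R c
    have hassoc : 5 * R.toNat * C.toNat = 5 * (R.toNat * C.toNat) := Nat.mul_assoc 5 _ _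
    have h5 : 5 * pvU R C (fun p => decide (p ∈ PySem.Set.ofList seeds))
        ≤ 5 * (R.toNat * C.toNat) := Nat.mul_le_mul_left 5 hu
    omega
  have invf := pvFloodB_run land R C seeds (5 * R.toNat * C.toNat + R.toNat + 1)
    seeds (PySem.Set.ofList seeds) inv0 hfuel
  set seen := pvFloodB land R C (5 * R.toNat * C.toNat + R.toNat + 1)
    seeds (PySem.Set.ofList seeds) with hseen
  have hseenmem := finalS_mem land R C seeds seen invf
  obtain ⟨L, hLnd, hLmem, hLlen⟩ := inv.colsum c
  have hbridge : ∀ p : Int × Int, p ∈ L ↔ p ∈ seen := by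
    intro p
    rw [hLmem p, hseenmem p]
    constructor
    · rintro ⟨hv, ρ, hokρ, hre⟩
      have hokp := inv.vok p.1 p.2 hv
      have hokp' : pvOk land R C p := by
        obtain ⟨x, y⟩ := p
        exact hokp
      refine ⟨(ρ, c), ?_, ?_⟩
      · rw [seeds_mem]
        exact ⟨hokρ.1, hokρ.2.1, hokρ.2.2.2.2, rfl⟩
      · exact pvReach_symm land R C p (ρ, c) hokp' hre
    · rintro ⟨s0, hs0, hre⟩
      have hoks0 := hseedok s0 hs0
      have hokp := pvReach_ok land R C s0 p hre hoks0
      obtain ⟨hb1, hb2, hb3, hb4⟩ := (seeds_mem land R c s0).mp hs0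
      have hs0e : s0 = (s0.1, c) := by
        rw [← hb4]
      refine ⟨hmark p hokp, s0.1, ?_, ?_⟩
      · rw [← hs0e]
        exact hoks0
      · rw [← hs0e]
        exact pvReach_symm land R C s0 p hoks0 hre
  have hperm : L.length = seen.length :=
    List.Perm.length_eq ((List.perm_ext_iff_of_nodup hLnd invf.nd).mpr hbridge)
  rw [hLlen, pvColLen, hperm]

-- ===== VERDICT (by name: the statement is the Claim_ definition above) =====
theorem solution_spec : Claim_equal_solution := by
  intro land hdom hpre
  show solution land = solution_alt land
  have hrun := foldRowsA land (land.length : Int) (land.headI.length : Int)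
    (PySem.List.pyRange 0 (land.length : Int) 1)
    (fun r hr => PySem.List.mem_pyRange_one.mp hr)
    (PySem.List.pyRange 0 (land.headI.length : Int) 1)
    (fun c hc => PySem.List.mem_pyRange_one.mp hc)
    ((fun _ _ => false), PySem.Dict.empty)
    (outerInitA land (land.length : Int) (land.headI.length : Int))
  have hmark : ∀ p : Int × Int,
      pvOk land (land.length : Int) (land.headI.length : Int) p →
      (pvRunA land).1 p.1 p.2 = true := by
    intro p hok
    exact hrun.2.2 p.1 (PySem.List.mem_pyRange_one.mpr ⟨hok.1, hok.2.1⟩)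
      p.2 (PySem.List.mem_pyRange_one.mpr ⟨hok.2.2.1, hok.2.2.2.1⟩) hok.2.2.2.2
  rw [solution_unfold, solution_alt_unfold]
  apply maxFold_eq
  intro c hc
  have hcb := PySem.List.mem_pyRange_one.mp hc
  exact colEq land (pvRunA land).1 (pvRunA land).2 hrun.1 hmark c hcb.1 hcb.2
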